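-- pv_equiv track=rewrite | github.com/alexanderrolle/minimal-presentations | FIRep_v2.py | get_first_vertex
-- ===== SOURCE A (Python) =====
-- def get_first_vertex(simplex):
--
--     vertex = []
--
--     for c in simplex:
--         vertex.append(c)
--         if c == " ":
--             break
--
--     for c in vertex:
--         simplex.remove(c)
--
--     return(vertex)
-- ===== SOURCE B (Python) =====
-- def get_first_vertex(simplex):
--     # positional: find first ' ', slice off the front segment in place
--     k = len(simplex)
--     for i, c in enumerate(simplex):
--         if c == " ":
--             k = i + 1
--             break
--     vertex = simplex[:k]
--     del simplex[:k]
--     return vertex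
-- ===== Notes on version B (the rewrite author's own statement) =====
-- stated objective: faster
-- what changed: Find the index of the first space and slice the prefix off positionally (list[:k] / del list[:k]) instead of building the prefix element by element and removing each value with an O(n) list.remove scan.
import Mathlib
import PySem

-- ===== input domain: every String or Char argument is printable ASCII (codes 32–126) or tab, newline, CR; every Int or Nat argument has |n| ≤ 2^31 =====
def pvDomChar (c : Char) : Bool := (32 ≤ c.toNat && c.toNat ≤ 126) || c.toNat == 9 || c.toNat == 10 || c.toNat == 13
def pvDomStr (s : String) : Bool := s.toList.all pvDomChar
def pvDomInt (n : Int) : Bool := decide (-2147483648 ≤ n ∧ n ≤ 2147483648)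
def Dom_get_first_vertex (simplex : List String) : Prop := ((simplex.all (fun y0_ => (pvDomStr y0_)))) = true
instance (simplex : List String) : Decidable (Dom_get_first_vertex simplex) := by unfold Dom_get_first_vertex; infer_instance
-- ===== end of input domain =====

-- Equivalence of the RETURN value only: both A and B also mutate `simplex` in place
-- (B performs the same mutation); B slices the prefix off positionally (one pass)
-- instead of A's element-by-element append + value-by-value remove — objective: simpler.


-- ===== PORT A =====
-- A's first loop: append c, then break if c == " "; the second loop only mutates
-- `simplex` (not modeled: return value is `vertex`).
def getFirstVertexLoopA (simplex : List String) : List String :=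
  match simplex with
  | [] => []
  | c :: rest => c :: (if c == " " then [] else getFirstVertexLoopA rest)

def get_first_vertex (simplex : List String) : List String :=
  getFirstVertexLoopA simplex

-- ===== PORT B =====
-- B: find the index of the first " " (k = i+1, else len), return simplex[:k].
def get_first_vertex_alt (simplex : List String) : List String :=
  let k : Nat :=
    match simplex.findIdx? (fun c => c == " ") with
    | some i => i + 1
    | none => simplex.length
  simplex.take k

-- ===== PRECONDITION & SPEC =====
def Spec_get_first_vertex (simplex : List String) (out : List String) : Prop := out = get_first_vertex_alt simplex
instance (simplex : List String) (out : List String) : Decidable (Spec_get_first_vertex simplex out) := by unfold Spec_get_first_vertex; infer_instance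

-- ===== CLAIM (what is proved, stated in full; the proofs are below) =====
def Claim_equal_get_first_vertex : Prop := ∀ (simplex : List String), Dom_get_first_vertex simplex → Spec_get_first_vertex simplex (get_first_vertex simplex)

-- ===== LEMMAS AND PROOFS =====
theorem loopA_eq_alt (simplex : List String) :
    getFirstVertexLoopA simplex = get_first_vertex_alt simplex := by
  induction simplex with
  | nil => rfl
  | cons c rest ih =>
    simp only [getFirstVertexLoopA, get_first_vertex_alt, List.findIdx?_cons]
    by_cases h : c = " "
    · simp [h]
    · have hc : (c == " ") = false := by simp [h]
      simp only [hc]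
      rw [ih]
      simp only [get_first_vertex_alt]
      cases hf : rest.findIdx? (fun c => c == " ") with
      | none => simp [List.take_succ_cons]
      | some i => simp [List.take_succ_cons]

-- ===== VERDICT (by name: the statement is the Claim_ definition above) =====
theorem get_first_vertex_spec : Claim_equal_get_first_vertex := by
  intro simplex _
  unfold Spec_get_first_vertex get_first_vertex
  exact loopA_eq_alt simplex
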